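-- pv_equiv track=rewrite | github.com/Hubsi91-create/agent-pipeline | backend/app/agents/agent_2_qc/service.py | _parse_qc_response
-- ===== SOURCE A (Python) =====
-- def _parse_qc_response(response: str) -> tuple[str, str, list[str]]:
--     """Parse Gemini's QC response"""
--     lines = response.strip().split('\n')
--
--     status = "NEEDS_REVISION"  # Default
--     feedback = ""
--     suggestions = []
--
--     for line in lines:
--         if line.startswith("STATUS:"):
--             status_text = line.replace("STATUS:", "").strip()
--             if "APPROVED" in status_text.upper():
--                 status = "APPROVED"
--             elif "REJECTED" in status_text.upper():
--                 status = "REJECTED"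
--         elif line.startswith("FEEDBACK:"):
--             feedback = line.replace("FEEDBACK:", "").strip()
--         elif line.startswith("-") or line.startswith("*"):
--             suggestions.append(line.lstrip("-* ").strip())
--
--     if not feedback:
--         feedback = response
--
--     return status, feedback, suggestions
-- ===== SOURCE B (Python) =====
-- def _parse_qc_response(response: str) -> tuple[str, str, list[str]]:
--     """Parse Gemini's QC response: three separate scans instead of one fused stateful loop."""
--     lines = response.strip().split('\n')
--
--     status = "NEEDS_REVISION"
--     for line in reversed(lines):
--         if line.startswith("STATUS:"):
--             t = line.replace("STATUS:", "").strip().upper()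
--             if "APPROVED" in t:
--                 status = "APPROVED"
--                 break
--             if "REJECTED" in t:
--                 status = "REJECTED"
--                 break
--
--     feedback = next((line.replace("FEEDBACK:", "").strip()
--                      for line in reversed(lines) if line.startswith("FEEDBACK:")), "")
--
--     suggestions = [line.lstrip("-* ").strip()
--                    for line in lines if line.startswith(("-", "*"))]
--
--     return status, feedback or response, suggestions
-- ===== Notes on version B (the rewrite author's own statement) =====
-- stated objective: alternative
-- what changed: The single fused stateful classifying loop is replaced by three independent scans: status by a reverse scan with early exit at the last keyword-bearing STATUS: line, feedback via the first FEEDBACK: line of the reversed lines, and suggestions by one filter+map comprehension.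
import Mathlib
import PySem

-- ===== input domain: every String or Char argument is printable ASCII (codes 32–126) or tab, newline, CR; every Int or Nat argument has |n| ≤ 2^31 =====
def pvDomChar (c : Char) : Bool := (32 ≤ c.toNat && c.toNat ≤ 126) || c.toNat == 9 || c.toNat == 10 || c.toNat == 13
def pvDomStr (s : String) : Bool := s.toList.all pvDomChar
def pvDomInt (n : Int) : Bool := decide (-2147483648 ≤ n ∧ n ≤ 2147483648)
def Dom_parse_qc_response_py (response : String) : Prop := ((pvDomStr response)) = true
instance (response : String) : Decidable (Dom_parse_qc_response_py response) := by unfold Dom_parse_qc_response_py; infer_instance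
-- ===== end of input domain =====

-- B replaces A's single fused stateful loop by three independent scans (reverse early-exit scans for status/feedback, filter+map for suggestions); objective: alternative decomposition, same cost.


-- ===== PORT A =====
-- hand port of s.lstrip("-* "): drop leading '-', '*', ' ' characters (exact: Python lstrip(chars) removes leading characters from the set)
def pyLstripDashStarSpace (s : String) : String :=
  String.ofList (s.toList.dropWhile (fun c => c == '-' || c == '*' || c == ' '))

-- s.split('\n'): Str.split? is some for the nonempty separator "\n", so getD [] is exact
def pySplitNewline (s : String) : List String :=
  (PySem.Str.split? s "\n").getD []

-- the body of A's for-loop over lines, on state (status, feedback, suggestions)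
def qcStep (acc : String × String × List String) (line : String) : String × String × List String :=
  if PySem.Str.startswith line "STATUS:" then
    let status_text := PySem.Str.strip (PySem.Str.replace line "STATUS:" "")
    if PySem.Str.isIn "APPROVED" (PySem.Str.upper status_text) then ("APPROVED", acc.2.1, acc.2.2)
    else if PySem.Str.isIn "REJECTED" (PySem.Str.upper status_text) then ("REJECTED", acc.2.1, acc.2.2)
    else acc
  else if PySem.Str.startswith line "FEEDBACK:" then
    (acc.1, PySem.Str.strip (PySem.Str.replace line "FEEDBACK:" ""), acc.2.2)
  else if PySem.Str.startswith line "-" || PySem.Str.startswith line "*" then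
    (acc.1, acc.2.1, acc.2.2 ++ [PySem.Str.strip (pyLstripDashStarSpace line)])
  else acc

def parse_qc_response_py (response : String) : String × String × List String :=
  let lines := pySplitNewline (PySem.Str.strip response)
  let r := lines.foldl qcStep ("NEEDS_REVISION", "", [])
  let feedback := if r.2.1 == "" then response else r.2.1
  (r.1, feedback, r.2.2)

-- ===== PORT B =====
-- B's reverse status scan: 'for line in reversed(lines): …; break on a keyword'
def altStatusScan : List String → String
  | [] => "NEEDS_REVISION"
  | line :: rest =>
    if PySem.Str.startswith line "STATUS:" then
      let t := PySem.Str.upper (PySem.Str.strip (PySem.Str.replace line "STATUS:" ""))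
      if PySem.Str.isIn "APPROVED" t then "APPROVED"
      else if PySem.Str.isIn "REJECTED" t then "REJECTED"
      else altStatusScan rest
    else altStatusScan rest

-- B's 'next((… for line in reversed(lines) if line.startswith("FEEDBACK:")), "")'
def altFeedbackScan : List String → String
  | [] => ""
  | line :: rest =>
    if PySem.Str.startswith line "FEEDBACK:" then PySem.Str.strip (PySem.Str.replace line "FEEDBACK:" "")
    else altFeedbackScan rest

def parse_qc_response_py_alt (response : String) : String × String × List String :=
  let lines := pySplitNewline (PySem.Str.strip response)
  let status := altStatusScan lines.reverse
  let feedback := altFeedbackScan lines.reverse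
  let suggestions :=
    (lines.filter (fun l => PySem.Str.startswith l "-" || PySem.Str.startswith l "*")).map
      (fun l => PySem.Str.strip (pyLstripDashStarSpace l))
  (status, if feedback == "" then response else feedback, suggestions)

-- ===== PRECONDITION & SPEC =====
def Spec_parse_qc_response_py (response : String) (out : String × String × List String) : Prop := out = parse_qc_response_py_alt response
instance (response : String) (out : String × String × List String) : Decidable (Spec_parse_qc_response_py response out) := by unfold Spec_parse_qc_response_py; infer_instance

-- ===== CLAIM (what is proved, stated in full; the proofs are below) =====
def Claim_equal_parse_qc_response_py : Prop := ∀ (response : String), Dom_parse_qc_response_py response → Spec_parse_qc_response_py response (parse_qc_response_py response)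

-- ===== LEMMAS AND PROOFS =====

-- a string that starts with (a :: p) does not start with (b :: q) when a ≠ b
lemma chars_sw_false {cs p : List Char} {a b : Char} (q : List Char) (hne : a ≠ b)
    (h : (a :: p) <+: cs) : PySem.Chars.startswith cs (b :: q) = false := by
  apply Bool.eq_false_iff.mpr
  intro hq
  rw [PySem.Chars.startswith_iff] at hq
  obtain ⟨t, rfl⟩ := h
  rw [List.cons_append, List.cons_prefix_cons] at hq
  exact hne hq.1.symm

lemma fold_eq (lines : List String) :
    lines.foldl qcStep ("NEEDS_REVISION", "", ([] : List String)) =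
      (altStatusScan lines.reverse, altFeedbackScan lines.reverse,
        (lines.filter (fun l => PySem.Str.startswith l "-" || PySem.Str.startswith l "*")).map
          (fun l => PySem.Str.strip (pyLstripDashStarSpace l))) := by
  induction lines using List.reverseRecOn with
  | nil => rfl
  | append_singleton xs l ih =>
    rw [List.foldl_append, ih]
    simp only [List.foldl_cons, List.foldl_nil, List.reverse_append, List.reverse_cons,
      List.reverse_nil, List.nil_append, List.cons_append, List.filter_append, List.map_append]
    by_cases hs : PySem.Chars.startswith l.toList ['S', 'T', 'A', 'T', 'U', 'S', ':'] = true
    · have hs' := (PySem.Chars.startswith_iff _ _).mp hs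
      have hf := chars_sw_false (cs := l.toList) ['E', 'E', 'D', 'B', 'A', 'C', 'K', ':'] (by decide : 'S' ≠ 'F') hs'
      have hd := chars_sw_false (cs := l.toList) [] (by decide : 'S' ≠ '-') hs'
      have hst := chars_sw_false (cs := l.toList) [] (by decide : 'S' ≠ '*') hs'
      by_cases h1 : PySem.Chars.isIn ['A', 'P', 'P', 'R', 'O', 'V', 'E', 'D']
          (PySem.Chars.upper (PySem.Chars.strip (PySem.Chars.replace l.toList ['S', 'T', 'A', 'T', 'U', 'S', ':'] []))) = true
      · simp [qcStep, altStatusScan, altFeedbackScan, hs, hf, hd, hst, h1]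
      · by_cases h2 : PySem.Chars.isIn ['R', 'E', 'J', 'E', 'C', 'T', 'E', 'D']
            (PySem.Chars.upper (PySem.Chars.strip (PySem.Chars.replace l.toList ['S', 'T', 'A', 'T', 'U', 'S', ':'] []))) = true
        · simp [qcStep, altStatusScan, altFeedbackScan, hs, hf, hd, hst, h1, h2]
        · simp [qcStep, altStatusScan, altFeedbackScan, hs, hf, hd, hst, h1, h2]
    · by_cases hf : PySem.Chars.startswith l.toList ['F', 'E', 'E', 'D', 'B', 'A', 'C', 'K', ':'] = true
      · have hf' := (PySem.Chars.startswith_iff _ _).mp hf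
        have hd := chars_sw_false (cs := l.toList) [] (by decide : 'F' ≠ '-') hf'
        have hst := chars_sw_false (cs := l.toList) [] (by decide : 'F' ≠ '*') hf'
        simp [qcStep, altStatusScan, altFeedbackScan, hs, hf, hd, hst]
      · by_cases hd : PySem.Chars.startswith l.toList ['-'] = true
        · simp [qcStep, altStatusScan, altFeedbackScan, hs, hf, hd]
        · by_cases hst : PySem.Chars.startswith l.toList ['*'] = true
          · simp [qcStep, altStatusScan, altFeedbackScan, hs, hf, hd, hst]
          · simp [qcStep, altStatusScan, altFeedbackScan, hs, hf, hd, hst]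

-- the two port bodies agree for any list of lines (both ports instantiate L with the same split)
lemma ports_agree_on_lines (response : String) (L : List String) :
    (let r := L.foldl qcStep ("NEEDS_REVISION", "", []);
     let feedback := if r.2.1 == "" then response else r.2.1;
     (r.1, feedback, r.2.2)) =
    (let status := altStatusScan L.reverse;
     let feedback := altFeedbackScan L.reverse;
     let suggestions := (L.filter (fun l => PySem.Str.startswith l "-" || PySem.Str.startswith l "*")).map (fun l => PySem.Str.strip (pyLstripDashStarSpace l));
     (status, if feedback == "" then response else feedback, suggestions)) := by
  simp only [fold_eq]

-- ===== VERDICT (by name: the statement is the Claim_ definition above) =====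
theorem parse_qc_response_py_spec : Claim_equal_parse_qc_response_py :=
  fun response _ => ports_agree_on_lines response (pySplitNewline (PySem.Str.strip response))
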